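-- pv_equiv track=rewrite | github.com/Nick-322/PiAlign | bin/filter_identical_interfaces.py | find_orphan_receptor
-- ===== SOURCE A (Python) =====
-- def find_orphan_receptor(int_receptor_pair, pchainsa):
--     '''
--     Finds receptor chains that are not interacting with any other receptor chains.
--     Takes int_receptor_pair from all_against_all_int_search function and receptor chainIDs.
--     Returns a list of receptor chains that are not interacting with any other receptor chains.
--     '''
--     receptor_chain_track = list(pchainsa)
--     for pair in int_receptor_pair:
--         if pair[0] in receptor_chain_track:
--             receptor_chain_track.remove(pair[0])
--
--         if pair[1] in receptor_chain_track:
--             receptor_chain_track.remove(pair[1])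
--
--     orphan_receptor_list = receptor_chain_track
--
--     return orphan_receptor_list
-- ===== SOURCE B (Python) =====
-- def find_orphan_receptor(int_receptor_pair, pchainsa):
--     '''
--     Finds receptor chains that are not interacting with any other receptor chains.
--     Table-first single pass: count removal attempts per chain once, then keep
--     each chain whose remaining budget is exhausted.
--     '''
--     budget = {}
--     for pair in int_receptor_pair:
--         budget[pair[0]] = budget.get(pair[0], 0) + 1
--         budget[pair[1]] = budget.get(pair[1], 0) + 1
--     kept = []
--     for chain in pchainsa:
--         n = budget.get(chain, 0)
--         if n > 0:
--             budget[chain] = n - 1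
--         else:
--             kept.append(chain)
--     return kept
-- ===== Notes on version B (the rewrite author's own statement) =====
-- stated objective: faster
-- what changed: Replaces A's repeated linear membership tests and list.remove scans over the tracking list with a hash-table removal budget built in one pass over the pairs, followed by a single order-preserving pass over pchainsa.
import Mathlib
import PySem

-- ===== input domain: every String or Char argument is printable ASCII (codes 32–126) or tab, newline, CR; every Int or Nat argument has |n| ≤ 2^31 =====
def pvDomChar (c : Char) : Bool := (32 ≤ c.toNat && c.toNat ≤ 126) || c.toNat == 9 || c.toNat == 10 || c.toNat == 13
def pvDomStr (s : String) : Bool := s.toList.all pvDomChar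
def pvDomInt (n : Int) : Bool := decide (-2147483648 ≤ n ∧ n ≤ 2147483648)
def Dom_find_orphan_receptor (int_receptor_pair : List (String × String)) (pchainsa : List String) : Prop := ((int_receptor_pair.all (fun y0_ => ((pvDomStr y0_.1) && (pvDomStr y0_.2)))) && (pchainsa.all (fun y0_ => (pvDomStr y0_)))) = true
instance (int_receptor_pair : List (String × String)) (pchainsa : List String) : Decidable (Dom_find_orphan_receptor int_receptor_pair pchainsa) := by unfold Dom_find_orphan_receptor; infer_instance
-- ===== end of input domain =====

-- B replaces A's per-pair list scans (in/remove) with a counting table built once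
-- and a single order-preserving pass over pchainsa (objective: faster).

-- ===== PORT A =====
-- literal transliteration: copy pchainsa, then for each pair conditionally
-- list.remove each component (first occurrence).
def find_orphan_receptor (int_receptor_pair : List (String × String)) (pchainsa : List String) : List String :=
  let receptor_chain_track := pchainsa
  let receptor_chain_track := int_receptor_pair.foldl (fun track pair =>
    let track := if pair.1 ∈ track then (PySem.List.remove? track pair.1).getD track else track
    if pair.2 ∈ track then (PySem.List.remove? track pair.2).getD track else track)
    receptor_chain_track
  let orphan_receptor_list := receptor_chain_track
  orphan_receptor_list

-- ===== PORT B =====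
-- literal transliteration of Source B: budget dict built over the pairs, then one
-- fold over pchainsa carrying (budget, kept).
def find_orphan_receptor_alt (int_receptor_pair : List (String × String)) (pchainsa : List String) : List String :=
  let budget : PySem.Dict String Int := int_receptor_pair.foldl (fun d pair =>
    let d := d.insert pair.1 (d.getD pair.1 0 + 1)
    d.insert pair.2 (d.getD pair.2 0 + 1)) PySem.Dict.empty
  let st := pchainsa.foldl (fun (st : PySem.Dict String Int × List String) chain =>
    let n := st.1.getD chain 0
    if n > 0 then (st.1.insert chain (n - 1), st.2)
    else (st.1, st.2 ++ [chain])) (budget, [])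
  st.2

-- ===== PRECONDITION & SPEC =====
def Spec_find_orphan_receptor (int_receptor_pair : List (String × String)) (pchainsa : List String) (out : List String) : Prop := out = find_orphan_receptor_alt int_receptor_pair pchainsa
instance (int_receptor_pair : List (String × String)) (pchainsa : List String) (out : List String) : Decidable (Spec_find_orphan_receptor int_receptor_pair pchainsa out) := by unfold Spec_find_orphan_receptor; infer_instance

-- ===== CLAIM (what is proved, stated in full; the proofs are below) =====
def Claim_equal_find_orphan_receptor : Prop := ∀ (int_receptor_pair : List (String × String)) (pchainsa : List String), Dom_find_orphan_receptor int_receptor_pair pchainsa → Spec_find_orphan_receptor int_receptor_pair pchainsa (find_orphan_receptor int_receptor_pair pchainsa)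

-- ===== LEMMAS AND PROOFS =====

-- the flattened removal attempts of A (pair[0] then pair[1], in order)
def pvAttempts (pairs : List (String × String)) : List String :=
  pairs.flatMap (fun p => [p.1, p.2])

-- abstract single pass with a pure Nat budget function
def pvConsume (g : String → Nat) (acc : List String) : List String → List String
  | [] => acc
  | x :: rest =>
    if g x > 0 then pvConsume (fun c => if c = x then g x - 1 else g c) acc rest
    else pvConsume g (acc ++ [x]) rest

lemma pvAstep_eq_erase (track : List String) (v : String) :
    (if v ∈ track then (PySem.List.remove? track v).getD track else track) = track.erase v := by
  by_cases h : v ∈ track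
  · rw [if_pos h, PySem.List.remove?_eq_some_erase _ _ h]; rfl
  · rw [if_neg h, List.erase_of_not_mem h]

lemma pvA_eq_foldl_erase (pairs : List (String × String)) (xs : List String) :
    find_orphan_receptor pairs xs = (pvAttempts pairs).foldl List.erase xs := by
  induction pairs generalizing xs with
  | nil => simp [find_orphan_receptor, pvAttempts]
  | cons p rest ih =>
    simp only [find_orphan_receptor, List.foldl_cons] at *
    rw [pvAstep_eq_erase, pvAstep_eq_erase]
    simpa [pvAttempts] using ih ((xs.erase p.1).erase p.2)

-- core commutation: one extra unit of budget at a = one erase of a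
lemma pvConsume_bump (a : String) (g : String → Nat) (xs acc : List String) :
    pvConsume (fun c => if c = a then g a + 1 else g c) acc xs = pvConsume g acc (xs.erase a) := by
  induction xs generalizing g acc with
  | nil => simp [pvConsume]
  | cons x rest ih =>
    by_cases hx : x = a
    · subst hx
      rw [List.erase_cons_head]
      simp only [pvConsume, Nat.succ_pos, if_pos]
      have heq : (fun c => if c = x then g x + 1 - 1 else if c = x then g x + 1 else g c) = g := by
        funext c; by_cases h : c = x <;> simp [h]
      rw [heq]
    · rw [List.erase_cons_tail (by simpa using hx)]
      simp only [pvConsume, if_neg hx]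
      by_cases hgx : g x > 0
      · rw [if_pos hgx, if_pos hgx]
        have heq : (fun c => if c = x then g x - 1 else if c = a then g a + 1 else g c)
             = (fun c => if c = a then (if a = x then g x - 1 else g a) + 1 else if c = x then g x - 1 else g c) := by
          funext c
          by_cases h1 : c = x <;> by_cases h2 : c = a <;> simp_all
        rw [heq]
        exact ih (fun c => if c = x then g x - 1 else g c) acc
      · rw [if_neg hgx, if_neg hgx, ih]

lemma pvConsume_zero (xs acc : List String) :
    pvConsume (fun _ => 0) acc xs = acc ++ xs := by
  induction xs generalizing acc with
  | nil => simp [pvConsume]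
  | cons x rest ih => simp [pvConsume, ih]

lemma pvConsume_count (attempts xs : List String) :
    pvConsume (fun c => attempts.count c) [] xs = attempts.foldl List.erase xs := by
  induction attempts generalizing xs with
  | nil => simpa using pvConsume_zero xs []
  | cons a rest ih =>
    have hc : (fun c => (a :: rest).count c) = (fun c => if c = a then rest.count a + 1 else rest.count c) := by
      funext c
      by_cases h : c = a
      · subst h; simp
      · simp [h, Ne.symm h]
    have hb : pvConsume (fun c => if c = a then rest.count a + 1 else rest.count c) [] xs
        = pvConsume (fun c => rest.count c) [] (xs.erase a) :=
      pvConsume_bump a (fun c => rest.count c) xs []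
    rw [hc, hb, ih, List.foldl_cons]

-- B's budget fold over pairs equals the single-insert fold over the flattened attempts
lemma pvBudget_eq_flat (pairs : List (String × String)) (d : PySem.Dict String Int) :
    pairs.foldl (fun d pair =>
      let d := d.insert pair.1 (d.getD pair.1 0 + 1)
      d.insert pair.2 (d.getD pair.2 0 + 1)) d
    = (pvAttempts pairs).foldl (fun d x => d.insert x (d.getD x 0 + 1)) d := by
  induction pairs generalizing d with
  | nil => simp [pvAttempts]
  | cons p rest ih => simp [pvAttempts, List.foldl_cons, ih]

-- B's second fold simulated by the pure pass, given pointwise agreement of the budget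
lemma pvPass_sim (xs : List String) (d : PySem.Dict String Int) (g : String → Nat) (acc : List String)
    (h : ∀ c, d.getD c 0 = (g c : Int)) :
    (xs.foldl (fun (st : PySem.Dict String Int × List String) chain =>
      let n := st.1.getD chain 0
      if n > 0 then (st.1.insert chain (n - 1), st.2)
      else (st.1, st.2 ++ [chain])) (d, acc)).2 = pvConsume g acc xs := by
  induction xs generalizing d g acc with
  | nil => simp [pvConsume]
  | cons x rest ih =>
    by_cases hg : g x > 0
    · have hd : d.getD x 0 > 0 := by rw [h x]; exact_mod_cast hg
      simp only [List.foldl_cons, pvConsume, if_pos hg]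
      simp only [if_pos hd]
      refine ih _ _ _ ?_
      intro c
      rw [PySem.Dict.getD_insert]
      by_cases hc : c = x
      · rw [if_pos hc, if_pos hc, h x]; omega
      · rw [if_neg hc, if_neg hc]; exact h c
    · have hd : ¬ d.getD x 0 > 0 := by rw [h x]; exact_mod_cast hg
      simp only [List.foldl_cons, pvConsume, if_neg hg]
      simp only [if_neg hd]
      exact ih d g (acc ++ [x]) h

-- ===== VERDICT (by name: the statement is the Claim_ definition above) =====
theorem find_orphan_receptor_spec : Claim_equal_find_orphan_receptor := by
  intro pairs xs _
  show find_orphan_receptor pairs xs = find_orphan_receptor_alt pairs xs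
  rw [pvA_eq_foldl_erase]
  unfold find_orphan_receptor_alt
  simp only [pvBudget_eq_flat]
  rw [pvPass_sim xs _ (fun c => (pvAttempts pairs).count c) []
      (fun c => by
        rw [PySem.Dict.getD_foldl_insert_add_one, PySem.Dict.getD_empty]
        simp)]
  exact (pvConsume_count (pvAttempts pairs) xs).symm
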